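-- pv_equiv track=rewrite | github.com/z3ro7706/Gist_z3ro | Code/Algorithm/5th_Dynamic_Programming_2024/Q1.py | Dynamic_Adventure
-- ===== SOURCE A (Python) =====
-- def Dynamic_Adventure(arr):
--     gap_m=arr[0]
--     value_list=arr[1:]
--
--     for i in range(0,len(value_list)):
--         arr_exp=[]
--         for j in range(1,gap_m+1):
--             if(i-j>=0):
--                 arr_exp.append(value_list[i]+value_list[i-j])
--
--         if(len(arr_exp)>=1):
--             value_list[i]=MAX(arr_exp)
--
--     return value_list[-1]
--
-- def MAX(arr):
--     max=arr[0]
--     for i in range(0,len(arr)):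
--         if(arr[i]>=max):
--             max=arr[i]
--
--     return max
-- ===== SOURCE B (Python) =====
-- def Dynamic_Adventure(arr):
--     m = arr[0]
--     vals = arr[1:]
--     dq = []   # (index, dp) pairs; indices increasing, dp values strictly decreasing
--     h = 0     # front pointer into dq (entries before h are evicted)
--     for i, x in enumerate(vals):
--         while h < len(dq) and dq[h][0] < i - m:
--             h += 1
--         dp = x + dq[h][1] if h < len(dq) else x
--         while len(dq) > h and dq[-1][1] <= dp:
--             dq.pop()
--         dq.append((i, dp))
--     return dp
-- ===== Notes on version B (the rewrite author's own statement) =====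
-- stated objective: faster
-- what changed: Replaced the naive per-index backward scan over the last gap_m dp values (plus a custom MAX helper) by a single pass maintaining a monotonic deque (index,dp) with a front pointer, so each dp value is computed from the deque front in amortized O(1).
import Mathlib
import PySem

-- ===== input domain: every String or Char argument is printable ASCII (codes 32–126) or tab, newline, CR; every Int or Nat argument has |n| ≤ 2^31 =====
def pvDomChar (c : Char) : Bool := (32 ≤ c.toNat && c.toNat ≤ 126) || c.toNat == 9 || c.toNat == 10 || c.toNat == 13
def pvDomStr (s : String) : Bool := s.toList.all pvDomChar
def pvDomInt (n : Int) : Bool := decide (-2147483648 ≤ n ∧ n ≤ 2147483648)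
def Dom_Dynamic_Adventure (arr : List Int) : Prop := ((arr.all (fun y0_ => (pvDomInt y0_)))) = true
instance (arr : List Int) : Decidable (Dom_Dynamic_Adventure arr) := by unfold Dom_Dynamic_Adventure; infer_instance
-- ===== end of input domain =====

-- B replaces A's O(n·gap_m) backward scan per index by a one-pass monotonic deque (sliding-window
-- maximum), computing the same dp values in amortized O(1) per element (objective: faster).

-- ===== PORT A =====
-- helper MAX(arr): max := arr[0]; scan all elements taking any ≥ max
def pvMAX (arr : List Int) : Int :=
  arr.foldl (fun mx x => if mx ≤ x then x else mx) ((PySem.List.pyGet? arr 0).getD 0)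

-- one iteration of A's outer loop (i-th index); the inner loop over j in range(1, gap_m+1)
def pvAStep (m : Int) (vl : List Int) (i : Nat) : List Int :=
  let arr_exp := (PySem.List.pyRange 1 (m + 1) 1).foldl
    (fun acc j => if (0:Int) ≤ (i : Int) - j then
        acc ++ [PySem.List.pyGetD vl (i : Int) 0 + PySem.List.pyGetD vl ((i : Int) - j) 0]
      else acc) []
  if 1 ≤ arr_exp.length then PySem.List.pySetD vl (i : Int) (pvMAX arr_exp) else vl

def Dynamic_Adventure (arr : List Int) : Int :=
  let gap_m := (PySem.List.pyGet? arr 0).getD 0          -- arr[0]; raises on [] (excluded by Pre_)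
  let value_list := PySem.List.slice arr (some 1) none   -- arr[1:]
  let value_list := (List.range value_list.length).foldl (pvAStep gap_m) value_list
  (PySem.List.pyGet? value_list (-1)).getD 0             -- value_list[-1]; raises on [x] (excluded by Pre_)

-- ===== PORT B =====
-- while h < len(dq) and dq[h][0] < bound: h += 1   (fuel = remaining entries; the loop
-- advances h at most dq.length - h times, so the fuel never runs out before the guard fails)
def pvEvictAux (dq : List (Int × Int)) (bound : Int) : Nat → Nat → Nat
  | 0, h => h
  | fuel + 1, h =>
    if h < dq.length ∧ (dq.getD h (0, 0)).1 < bound then pvEvictAux dq bound fuel (h + 1) else h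

def pvEvict (dq : List (Int × Int)) (bound : Int) (h : Nat) : Nat :=
  pvEvictAux dq bound (dq.length - h) h

-- while len(dq) > h and dq[-1][1] <= dp: dq.pop()   (fuel likewise)
def pvPopAux (h : Nat) (dp : Int) : Nat → List (Int × Int) → List (Int × Int)
  | 0, dq => dq
  | fuel + 1, dq =>
    if h < dq.length ∧ (dq.getLast?.getD (0, 0)).2 ≤ dp then pvPopAux h dp fuel dq.dropLast else dq

def pvPop (dq : List (Int × Int)) (h : Nat) (dp : Int) : List (Int × Int) :=
  pvPopAux h dp (dq.length - h) dq

-- body of B's loop: state (dq, h, dp), element (i, x)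
def pvBStep (m : Int) (st : List (Int × Int) × Nat × Int) (p : Int × Int) : List (Int × Int) × Nat × Int :=
  let h := pvEvict st.1 (p.1 - m) st.2.1
  let dp := if h < st.1.length then p.2 + (st.1.getD h (0, 0)).2 else p.2
  (pvPop st.1 h dp ++ [(p.1, dp)], h, dp)

def Dynamic_Adventure_alt (arr : List Int) : Int :=
  let m := (PySem.List.pyGet? arr 0).getD 0              -- arr[0]; raises on [] (excluded by Pre_)
  let vals := PySem.List.slice arr (some 1) none         -- arr[1:]
  -- dp is unbound in Python when vals == [] (excluded by Pre_); the fold state carries it, init 0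
  ((PySem.List.enumerate vals 0).foldl (pvBStep m) ([], 0, 0)).2.2

-- ===== PRECONDITION & SPEC =====
-- A raises IndexError on arr = [] (arr[0]) and on single-element arr (value_list[-1]); B raises there too.
def Pre_Dynamic_Adventure (arr : List Int) : Prop := 2 ≤ arr.length
instance (arr : List Int) : Decidable (Pre_Dynamic_Adventure arr) := by unfold Pre_Dynamic_Adventure; infer_instance
def pvWitness_Dynamic_Adventure : List Int := [2, 3, -1, 4]

def Spec_Dynamic_Adventure (arr : List Int) (out : Int) : Prop := out = Dynamic_Adventure_alt arr
instance (arr : List Int) (out : Int) : Decidable (Spec_Dynamic_Adventure arr out) := by unfold Spec_Dynamic_Adventure; infer_instance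

-- ===== CLAIM (what is proved, stated in full; the proofs are below) =====
def Claim_equal_Dynamic_Adventure : Prop := ∀ (arr : List Int), Dom_Dynamic_Adventure arr → Pre_Dynamic_Adventure arr → Spec_Dynamic_Adventure arr (Dynamic_Adventure arr)

-- ===== LEMMAS AND PROOFS =====

-- ---------- shared dp specification ----------
-- dp values: pvDpAux m v n = the first n dp values; dp[i] = v[i] + max of dp over window [i-m, i-1]
def pvDpAux (m : Int) (v : List Int) : Nat → List Int
  | 0 => []
  | n + 1 =>
    let p := pvDpAux m v n
    p ++ [v.getD n 0 + ((p.drop ((n : Int) - m).toNat).max?.getD 0)]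

def pvDpf (m : Int) (v : List Int) (n : Nat) : Int := (pvDpAux m v (n + 1)).getD n 0

def pvWin (m : Int) (v : List Int) (n : Nat) : List Int :=
  (((List.range n).map (pvDpf m v)).drop ((n : Int) - m).toNat)

lemma pvDpAux_length (m : Int) (v : List Int) (n : Nat) : (pvDpAux m v n).length = n := by
  induction n with
  | zero => rfl
  | succ n ih => simp [pvDpAux, ih]

lemma pvDpf_eq_last (m : Int) (v : List Int) (n : Nat) :
    pvDpf m v n = v.getD n 0 + (((pvDpAux m v n).drop ((n : Int) - m).toNat).max?.getD 0) := by
  unfold pvDpf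
  conv_lhs => rw [pvDpAux]
  simp [List.getD_eq_getElem?_getD, pvDpAux_length]

lemma pvDpAux_succ' (m : Int) (v : List Int) (n : Nat) :
    pvDpAux m v (n + 1) = pvDpAux m v n ++ [pvDpf m v n] := by
  rw [pvDpAux, pvDpf_eq_last]

lemma pvDpAux_eq_map (m : Int) (v : List Int) (n : Nat) :
    pvDpAux m v n = (List.range n).map (pvDpf m v) := by
  induction n with
  | zero => rfl
  | succ n ih => rw [pvDpAux_succ', ih, List.range_succ, List.map_append, List.map_singleton]

lemma pvDpf_def (m : Int) (v : List Int) (n : Nat) :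
    pvDpf m v n = v.getD n 0 + (pvWin m v n).max?.getD 0 := by
  rw [pvDpf_eq_last, pvDpAux_eq_map]; rfl

lemma mem_pvWin (m : Int) (v : List Int) (n : Nat) (x : Int) :
    x ∈ pvWin m v n ↔ ∃ j : Nat, (n : Int) - m ≤ (j : Int) ∧ j < n ∧ x = pvDpf m v j := by
  unfold pvWin
  constructor
  · intro hx
    obtain ⟨i, hi, hx⟩ := List.mem_iff_getElem.mp hx
    simp only [List.getElem_drop, List.getElem_map, List.getElem_range] at hx
    simp only [List.length_drop, List.length_map, List.length_range] at hi
    refine ⟨((n : Int) - m).toNat + i, ?_, by omega, hx.symm⟩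
    have := Int.self_le_toNat ((n : Int) - m)
    push_cast
    omega
  · rintro ⟨j, h1, h2, rfl⟩
    have hlo : ((n : Int) - m).toNat ≤ j := Int.toNat_le.mpr h1
    apply List.mem_iff_getElem.mpr
    refine ⟨j - ((n : Int) - m).toNat, ?_, ?_⟩
    · simp only [List.length_drop, List.length_map, List.length_range]; omega
    · simp only [List.getElem_drop, List.getElem_map, List.getElem_range]
      congr 1
      omega

-- ---------- max characterisation ----------
lemma pvMaxD_spec {l : List Int} (hl : l ≠ []) :
    l.max?.getD 0 ∈ l ∧ ∀ x ∈ l, x ≤ l.max?.getD 0 := by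
  cases h : l.max? with
  | none => exact absurd (List.max?_eq_none_iff.mp h) hl
  | some a =>
    have := List.max?_eq_some_iff.mp h
    simpa [h] using this

lemma pvMaxD_eq {l : List Int} {a : Int} (ha : a ∈ l) (h : ∀ x ∈ l, x ≤ a) :
    l.max?.getD 0 = a := by
  have hne : l ≠ [] := by rintro rfl; cases ha
  obtain ⟨hmem, hle⟩ := pvMaxD_spec hne
  exact le_antisymm (h _ hmem) (hle a ha)

lemma pvMAX_eq {l : List Int} (hl : l ≠ []) : pvMAX l = l.max?.getD 0 := by
  obtain ⟨a, t, rfl⟩ := List.exists_cons_of_ne_nil hl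
  unfold pvMAX
  have hfn : (fun (mx x : Int) => if mx ≤ x then x else mx) = (max : Int → Int → Int) := by
    funext mx x
    rw [max_def]
  rw [hfn]
  simp [List.max?, List.foldl_cons, max_self]

-- ---------- A side ----------
lemma pvAStep_eq (m : Int) (v : List Int) (n : Nat) (hn : n < v.length) :
    pvAStep m (pvDpAux m v n ++ v.drop n) n = pvDpAux m v (n + 1) ++ v.drop (n + 1) := by
  set vl := pvDpAux m v n ++ v.drop n with hvl
  have hvn : PySem.List.pyGetD vl (n : Int) 0 = v[n] := by
    rw [PySem.List.pyGetD_natCast, List.getD_eq_getElem?_getD,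
      List.getElem?_append_right (by simp [pvDpAux_length])]
    simp [pvDpAux_length, hn]
  have hgetdp : ∀ j : Int, 0 ≤ (n : Int) - j →
      PySem.List.pyGetD vl ((n : Int) - j) 0
        = (pvDpAux m v n ++ v.drop n).getD ((n : Int) - j).toNat 0 := by
    intro j h0
    rw [PySem.List.pyGetD_of_nonneg _ _ h0]
  have hgetdp2 : ∀ k : Nat, k < n → vl.getD k 0 = pvDpf m v k := by
    intro k hk
    rw [hvl, List.getD_eq_getElem?_getD,
      List.getElem?_append_left (by simp [pvDpAux_length, hk]), pvDpAux_eq_map]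
    simp [hk]
  -- the inner loop builds a filtered map
  have hbody : pvAStep m vl n =
      (if 1 ≤ (((PySem.List.pyRange 1 (m + 1) 1).filter
            (fun j => decide ((0:Int) ≤ (n : Int) - j))).map
            (fun j => PySem.List.pyGetD vl (n : Int) 0 + PySem.List.pyGetD vl ((n : Int) - j) 0)).length
        then PySem.List.pySetD vl (n : Int)
          (pvMAX (((PySem.List.pyRange 1 (m + 1) 1).filter
            (fun j => decide ((0:Int) ≤ (n : Int) - j))).map
            (fun j => PySem.List.pyGetD vl (n : Int) 0 + PySem.List.pyGetD vl ((n : Int) - j) 0)))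
        else vl) := by
    unfold pvAStep
    rw [show (fun (acc : List Int) (j : Int) =>
          if (0:Int) ≤ (n : Int) - j then
            acc ++ [PySem.List.pyGetD vl (n : Int) 0 + PySem.List.pyGetD vl ((n : Int) - j) 0]
          else acc)
        = (fun acc j => if (fun j => decide ((0:Int) ≤ (n : Int) - j)) j = true then
            acc ++ [PySem.List.pyGetD vl (n : Int) 0 + PySem.List.pyGetD vl ((n : Int) - j) 0]
          else acc) from by simp, PySem.List.foldl_append_if]
    simp
  set E := (((PySem.List.pyRange 1 (m + 1) 1).filter
      (fun j => decide ((0:Int) ≤ (n : Int) - j))).map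
      (fun j => PySem.List.pyGetD vl (n : Int) 0 + PySem.List.pyGetD vl ((n : Int) - j) 0)) with hE
  have hmemE : ∀ x, x ∈ E ↔ ∃ y ∈ pvWin m v n, x = v[n] + y := by
    intro x
    rw [hE]
    simp only [List.mem_map, List.mem_filter, PySem.List.mem_pyRange_one, decide_eq_true_eq]
    constructor
    · rintro ⟨j, ⟨⟨hj1, hj2⟩, hj0⟩, rfl⟩
      refine ⟨pvDpf m v ((n : Int) - j).toNat, ?_, ?_⟩
      · rw [mem_pvWin]
        exact ⟨((n : Int) - j).toNat, by omega, by omega, rfl⟩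
      · rw [hvn, hgetdp j hj0, hgetdp2 _ (by omega)]
    · rintro ⟨y, hy, rfl⟩
      rw [mem_pvWin] at hy
      obtain ⟨k, hk1, hk2, rfl⟩ := hy
      refine ⟨(n : Int) - k, ⟨⟨by omega, by omega⟩, by omega⟩, ?_⟩
      rw [hvn, hgetdp _ (by omega)]
      rw [show ((n : Int) - ((n : Int) - (k : Int))).toNat = k by omega]
      rw [hgetdp2 _ hk2]
  have hdropn : v.drop n = v[n] :: v.drop (n + 1) := List.drop_eq_getElem_cons hn
  rw [hbody]
  by_cases hEnil : E = []
  · -- empty window: dp n = v[n], the list entry is untouched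
    have hwin : pvWin m v n = [] := by
      by_contra hw
      obtain ⟨y, hy⟩ := List.exists_mem_of_ne_nil _ hw
      have hyE : v[n] + y ∈ E := (hmemE _).mpr ⟨y, hy, rfl⟩
      rw [hEnil] at hyE
      cases hyE
    rw [hEnil]
    simp only [List.length_nil]
    rw [if_neg (by omega)]
    rw [pvDpAux_succ', pvDpf_def, hwin]
    have hget : v.getD n 0 = v[n] := by simp [List.getD_eq_getElem?_getD, hn]
    rw [hvl, hdropn, hget]
    simp
  · -- nonempty window: the entry becomes dp n = v[n] + max of the window
    have hlen1 : 1 ≤ E.length := by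
      have := List.length_pos_of_ne_nil hEnil
      omega
    rw [if_pos hlen1]
    have hwinne : pvWin m v n ≠ [] := by
      intro hw
      obtain ⟨x, hx⟩ := List.exists_mem_of_ne_nil _ hEnil
      obtain ⟨y, hy, _⟩ := (hmemE x).mp hx
      rw [hw] at hy
      cases hy
    obtain ⟨hwmem, hwle⟩ := pvMaxD_spec hwinne
    have hmax : pvMAX E = pvDpf m v n := by
      rw [pvMAX_eq hEnil, pvDpf_def]
      have hget : v.getD n 0 = v[n] := by simp [List.getD_eq_getElem?_getD, hn]
      rw [hget]
      apply pvMaxD_eq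
      · exact (hmemE _).mpr ⟨_, hwmem, rfl⟩
      · intro x hx
        obtain ⟨y, hy, rfl⟩ := (hmemE x).mp hx
        exact by have := hwle y hy; omega
    rw [hmax, PySem.List.pySetD_natCast, hvl, pvDpAux_succ']
    rw [hdropn, List.set_append]
    simp [pvDpAux_length]
    rw [hdropn]
    rfl

lemma pvALoop (m : Int) (v : List Int) (n : Nat) (hn : n ≤ v.length) :
    (List.range n).foldl (pvAStep m) v = pvDpAux m v n ++ v.drop n := by
  induction n with
  | zero => simp [pvDpAux]
  | succ n ih =>
    rw [List.range_succ, List.foldl_append, ih (by omega), List.foldl_cons, List.foldl_nil,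
      pvAStep_eq m v n (by omega)]

lemma Dynamic_Adventure_eq_dpf (arr : List Int) (h : 2 ≤ arr.length) :
    Dynamic_Adventure arr =
      pvDpf ((PySem.List.pyGet? arr 0).getD 0) arr.tail (arr.tail.length - 1) := by
  unfold Dynamic_Adventure
  rw [PySem.List.slice_from_one]
  set m := (PySem.List.pyGet? arr 0).getD 0
  set v := arr.tail with hv
  have hlen : 1 ≤ v.length := by
    rw [hv, List.length_tail]
    omega
  change (PySem.List.pyGet? ((List.range v.length).foldl (pvAStep m) v) (-1)).getD 0
      = pvDpf m v (v.length - 1)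
  rw [pvALoop m v v.length (le_refl _), List.drop_length, List.append_nil]
  rw [show v.length = (v.length - 1) + 1 by omega, pvDpAux_succ']
  rw [PySem.List.pyGet?_neg_one]
  simp

-- ---------- B side ----------
-- suffix-maxima entries of dp over [0, k): (j, dp j) with dp j strictly above every later dp value
def pvSM (m : Int) (v : List Int) (k : Nat) : List (Int × Int) :=
  ((List.range k).filter
      (fun j => decide (∀ j' < k, j < j' → pvDpf m v j' < pvDpf m v j))).map
    (fun (j : Nat) => ((j : Int), pvDpf m v j))

-- the live part of the deque after k loop iterations
def pvActive (m : Int) (v : List Int) (k : Nat) : List (Int × Int) :=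
  (pvSM m v k).filter (fun p => decide ((k : Int) - 1 - m ≤ p.1 ∨ p.1 = (k : Int) - 1))

def pvD (m : Int) (v : List Int) (k : Nat) : Int := if k = 0 then 0 else pvDpf m v (k - 1)

lemma pvEvict_spec (b : Int) (act : List (Int × Int)) :
    ∀ dead : List (Int × Int),
      pvEvict (dead ++ act) b dead.length
        = dead.length + (act.takeWhile (fun p => decide (p.1 < b))).length := by
  have haux : ∀ (act : List (Int × Int)) (dead : List (Int × Int)) (fuel : Nat),
      act.length ≤ fuel →
      pvEvictAux (dead ++ act) b fuel dead.length
        = dead.length + (act.takeWhile (fun p => decide (p.1 < b))).length := by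
    intro act
    induction act with
    | nil =>
      intro dead fuel _
      cases fuel with
      | zero => simp [pvEvictAux]
      | succ f =>
        rw [pvEvictAux, if_neg (by simp)]
        simp
    | cons p rest ih =>
      intro dead fuel hfuel
      obtain ⟨f, rfl⟩ : ∃ f, fuel = f + 1 := by
        cases fuel with
        | zero => simp at hfuel
        | succ f => exact ⟨f, rfl⟩
      have hget : (dead ++ p :: rest).getD dead.length (0, 0) = p := by
        simp [List.getD_eq_getElem?_getD, List.getElem?_append_right (le_refl dead.length)]
      by_cases hp : p.1 < b
      · rw [pvEvictAux, if_pos ⟨by simp, by rw [hget]; exact hp⟩]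
        rw [show dead ++ p :: rest = (dead ++ [p]) ++ rest by simp]
        rw [show dead.length + 1 = (dead ++ [p]).length by simp]
        rw [ih (dead ++ [p]) f (by simp at hfuel ⊢; omega)]
        simp [hp]
        omega
      · rw [pvEvictAux, if_neg (by simp [hget, hp])]
        simp [hp]
  intro dead
  rw [pvEvict, show (dead ++ act).length - dead.length = act.length by simp]
  exact haux act dead act.length (le_refl _)

lemma pvPop_spec (dp : Int) : ∀ (act : List (Int × Int)),
    act.Pairwise (fun p q => q.2 < p.2) →
    ∀ dead : List (Int × Int),
      pvPop (dead ++ act) dead.length dp = dead ++ act.takeWhile (fun p => decide (dp < p.2)) := by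
  have haux : ∀ (act : List (Int × Int)),
      act.Pairwise (fun p q => q.2 < p.2) →
      ∀ (dead : List (Int × Int)) (fuel : Nat), act.length ≤ fuel →
      pvPopAux dead.length dp fuel (dead ++ act)
        = dead ++ act.takeWhile (fun p => decide (dp < p.2)) := by
    intro act
    induction act using List.reverseRecOn with
    | nil =>
      intro _ dead fuel _
      cases fuel with
      | zero => simp [pvPopAux]
      | succ f =>
        rw [pvPopAux, if_neg (by simp)]
        simp
    | append_singleton init l ih =>
      intro hs dead fuel hfuel
      obtain ⟨f, rfl⟩ : ∃ f, fuel = f + 1 := by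
        cases fuel with
        | zero => simp at hfuel
        | succ f => exact ⟨f, rfl⟩
      have hpw : init.Pairwise (fun p q => q.2 < p.2) :=
        List.Pairwise.sublist (List.sublist_append_left init [l]) hs
      have hrel : ∀ q ∈ init, l.2 < q.2 := by
        have := (List.pairwise_append.mp hs).2.2
        intro q hq
        exact this q hq l (by simp)
      rw [← List.append_assoc]
      by_cases hl : l.2 ≤ dp
      · rw [pvPopAux, if_pos ⟨by simp only [List.length_append, List.length_cons, List.length_nil]; omega,
          by simp [hl]⟩, List.dropLast_concat]
        rw [ih hpw dead f (by simp at hfuel ⊢; omega)]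
        congr 1
        symm
        rw [List.takeWhile_append]
        split_ifs with hlen
        · rw [List.takeWhile_cons_of_neg (by simp; omega), (List.takeWhile_prefix _).eq_of_length hlen]
          simp
        · rfl
      · rw [pvPopAux, if_neg (by simp [hl])]
        have : (init ++ [l]).takeWhile (fun p => decide (dp < p.2)) = init ++ [l] := by
          rw [List.takeWhile_eq_self_iff]
          intro q hq
          rcases List.mem_append.mp hq with h | h
          · have := hrel q h
            simp
            omega
          · simp at h
            subst h
            simp
            omega
        rw [this, List.append_assoc]
  intro act hs dead
  rw [pvPop, show (dead ++ act).length - dead.length = act.length by simp]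
  exact haux act hs dead act.length (le_refl _)

lemma pvDropWhile_sorted (b : Int) (l : List (Int × Int))
    (hs : l.Pairwise (fun p q => p.1 < q.1)) :
    l.dropWhile (fun p => decide (p.1 < b)) = l.filter (fun p => decide (b ≤ p.1)) := by
  induction l with
  | nil => rfl
  | cons p rest ih =>
    obtain ⟨hhead, htail⟩ := List.pairwise_cons.mp hs
    by_cases hp : p.1 < b
    · rw [List.dropWhile_cons_of_pos (by simpa using hp), ih htail,
        List.filter_cons_of_neg (by simpa using hp)]
    · rw [List.dropWhile_cons_of_neg (by simpa using hp),
        List.filter_cons_of_pos (by simpa using not_lt.mp hp)]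
      congr 1
      symm
      rw [List.filter_eq_self]
      intro q hq
      have := hhead q hq
      simp
      omega

lemma pvTakeWhile_sorted (dp : Int) (l : List (Int × Int))
    (hs : l.Pairwise (fun p q => q.2 < p.2)) :
    l.takeWhile (fun p => decide (dp < p.2)) = l.filter (fun p => decide (dp < p.2)) := by
  induction l with
  | nil => rfl
  | cons p rest ih =>
    obtain ⟨hhead, htail⟩ := List.pairwise_cons.mp hs
    by_cases hp : dp < p.2
    · rw [List.takeWhile_cons_of_pos (by simpa using hp), ih htail,
        List.filter_cons_of_pos (by simpa using hp)]
    · rw [List.takeWhile_cons_of_neg (by simpa using hp),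
        List.filter_cons_of_neg (by simpa using hp)]
      symm
      rw [List.filter_eq_nil_iff]
      intro q hq
      have := hhead q hq
      simp
      omega

lemma pvSM_mem (m : Int) (v : List Int) (k : Nat) (p : Int × Int) :
    p ∈ pvSM m v k ↔ ∃ j : Nat, j < k ∧ p = ((j : Int), pvDpf m v j) ∧
      ∀ j' < k, j < j' → pvDpf m v j' < pvDpf m v j := by
  simp only [pvSM, List.mem_map, List.mem_filter, List.mem_range, decide_eq_true_eq]
  constructor
  · rintro ⟨j, ⟨hj, hgood⟩, rfl⟩
    exact ⟨j, hj, rfl, hgood⟩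
  · rintro ⟨j, hj, rfl, hgood⟩
    exact ⟨j, ⟨hj, hgood⟩, rfl⟩

lemma pvSM_pairwise (m : Int) (v : List Int) (k : Nat) :
    (pvSM m v k).Pairwise (fun p q => p.1 < q.1 ∧ q.2 < p.2) := by
  unfold pvSM
  rw [List.pairwise_map]
  have h1 : ((List.range k).filter
      (fun j => decide (∀ j' < k, j < j' → pvDpf m v j' < pvDpf m v j))).Pairwise (· < ·) :=
    List.Pairwise.filter _ (List.pairwise_lt_range)
  refine List.Pairwise.imp_of_mem ?_ h1
  intro a b ha hb hab
  have hga := (List.mem_filter.mp ha).2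
  have hbk := List.mem_range.mp (List.mem_filter.mp hb).1
  simp only [decide_eq_true_eq] at hga
  exact ⟨by simp; exact_mod_cast hab, by simpa using hga b hbk hab⟩

lemma pvSM_succ (m : Int) (v : List Int) (k : Nat) :
    pvSM m v (k + 1)
      = (pvSM m v k).filter (fun p => decide (pvDpf m v k < p.2)) ++ [((k : Int), pvDpf m v k)] := by
  unfold pvSM
  rw [List.range_succ, List.filter_append, List.map_append, List.filter_map]
  congr 1
  · rw [List.filter_filter]
    apply congrArg
    apply List.filter_congr
    intro j hj
    have hjk := List.mem_range.mp hj
    simp only [Function.comp]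
    rw [Bool.eq_iff_iff]
    simp only [Bool.and_eq_true, decide_eq_true_eq]
    constructor
    · intro hgood
      exact ⟨hgood k (by omega) hjk, fun j' hj' hjj' => hgood j' (by omega) hjj'⟩
    · rintro ⟨hk, hgood⟩ j' hj' hjj'
      rcases Nat.lt_succ_iff_lt_or_eq.mp hj' with h | h
      · exact hgood j' h hjj'
      · subst h
        exact hk
  · have : (List.filter (fun j => decide (∀ j' < k + 1, j < j' → pvDpf m v j' < pvDpf m v j)) [k]) = [k] := by
      simp only [List.filter_cons, List.filter_nil, decide_eq_true_eq]
      rw [if_pos]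
      intro j' h1 h2
      omega
    rw [this, List.map_singleton]

-- every window element is dominated by a later suffix-maximal element of the window
lemma pvGood_dominates (m : Int) (v : List Int) (k : Nat) :
    ∀ d j : Nat, k - j ≤ d → j < k → (k : Int) - m ≤ (j : Int) →
      ∃ j0 : Nat, j ≤ j0 ∧ j0 < k ∧ pvDpf m v j ≤ pvDpf m v j0 ∧
        ∀ j' < k, j0 < j' → pvDpf m v j' < pvDpf m v j0 := by
  intro d
  induction d with
  | zero => intro j hd hj _; omega
  | succ d ih =>
    intro j hd hj hjm
    by_cases hg : ∀ j' < k, j < j' → pvDpf m v j' < pvDpf m v j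
    · exact ⟨j, le_refl _, hj, le_refl _, hg⟩
    · push_neg at hg
      obtain ⟨j', hj'k, hjj', hge⟩ := hg
      obtain ⟨j0, h1, h2, h3, h4⟩ := ih j' (by omega) hj'k (by push_cast at hjm ⊢; omega)
      exact ⟨j0, by omega, h2, le_trans hge h3, h4⟩

lemma pvFront_empty_iff (m : Int) (v : List Int) (k : Nat) :
    (pvSM m v k).filter (fun p => decide ((k : Int) - m ≤ p.1)) = [] ↔ pvWin m v k = [] := by
  constructor
  · intro hA
    by_contra hw
    obtain ⟨x, hx⟩ := List.exists_mem_of_ne_nil _ hw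
    obtain ⟨j, hjm, hjk, rfl⟩ := (mem_pvWin m v k x).mp hx
    obtain ⟨j0, h1, h2, h3, h4⟩ := pvGood_dominates m v k k j (by omega) hjk hjm
    have hmem : ((j0 : Int), pvDpf m v j0) ∈ (pvSM m v k).filter
        (fun p => decide ((k : Int) - m ≤ p.1)) := by
      rw [List.mem_filter]
      refine ⟨(pvSM_mem m v k _).mpr ⟨j0, h2, rfl, h4⟩, by simp; push_cast at hjm ⊢; omega⟩
    rw [hA] at hmem
    cases hmem
  · intro hw
    rcases h : (pvSM m v k).filter (fun p => decide ((k : Int) - m ≤ p.1)) with _ | ⟨q, rest⟩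
    · exact h
    · have hq : q ∈ (pvSM m v k).filter (fun p => decide ((k : Int) - m ≤ p.1)) := by
        rw [h]; exact List.mem_cons_self
      obtain ⟨hqS, hqb⟩ := List.mem_filter.mp hq
      obtain ⟨j, hjk, rfl, _⟩ := (pvSM_mem m v k q).mp hqS
      simp only [decide_eq_true_eq] at hqb
      have : pvDpf m v j ∈ pvWin m v k := (mem_pvWin m v k _).mpr ⟨j, hqb, hjk, rfl⟩
      rw [hw] at this
      cases this

lemma pvFront_head (m : Int) (v : List Int) (k : Nat) (q : Int × Int) (rest : List (Int × Int))
    (hq : (pvSM m v k).filter (fun p => decide ((k : Int) - m ≤ p.1)) = q :: rest) :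
    q.2 = (pvWin m v k).max?.getD 0 := by
  have hq : q ∈ (pvSM m v k).filter (fun p => decide ((k : Int) - m ≤ p.1)) := by
    rw [hq]; exact List.mem_cons_self
  obtain ⟨hqS, hqb⟩ := List.mem_filter.mp hq
  obtain ⟨j, hjk, rfl, hgood⟩ := (pvSM_mem m v k q).mp hqS
  simp only [decide_eq_true_eq] at hqb
  have hpw : ((pvSM m v k).filter (fun p => decide ((k : Int) - m ≤ p.1))).Pairwise
      (fun p q => p.1 < q.1 ∧ q.2 < p.2) := List.Pairwise.filter _ (pvSM_pairwise m v k)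
  rw [‹(pvSM m v k).filter _ = _›] at hpw
  symm
  apply pvMaxD_eq
  · exact (mem_pvWin m v k _).mpr ⟨j, hqb, hjk, rfl⟩
  · intro x hx
    obtain ⟨jx, hjxm, hjxk, rfl⟩ := (mem_pvWin m v k x).mp hx
    obtain ⟨j0, h1, h2, h3, h4⟩ := pvGood_dominates m v k k jx (by omega) hjxk hjxm
    have hmem : ((j0 : Int), pvDpf m v j0) ∈ (pvSM m v k).filter
        (fun p => decide ((k : Int) - m ≤ p.1)) := by
      rw [List.mem_filter]
      refine ⟨(pvSM_mem m v k _).mpr ⟨j0, h2, rfl, h4⟩, by simp; push_cast at hjxm ⊢; omega⟩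
    rw [‹(pvSM m v k).filter _ = _›] at hmem
    rcases List.mem_cons.mp hmem with h | h
    · have : pvDpf m v j0 = pvDpf m v j := congrArg Prod.snd h
      simp at this ⊢
      omega
    · have := (List.pairwise_cons.mp hpw).1 _ h
      simp at this ⊢
      omega

lemma pvBStep_eq (m : Int) (v : List Int) (k : Nat) (dead : List (Int × Int)) :
    ∃ dead' : List (Int × Int),
      pvBStep m (dead ++ pvActive m v k, dead.length, pvD m v k) ((k : Int), v.getD k 0)
        = (dead' ++ pvActive m v (k + 1), dead'.length, pvD m v (k + 1)) := by
  refine ⟨dead ++ (pvActive m v k).takeWhile (fun p => decide (p.1 < (k : Int) - m)), ?_⟩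
  have hApw : (pvActive m v k).Pairwise (fun p q => p.1 < q.1) :=
    (List.Pairwise.filter _ (pvSM_pairwise m v k)).imp (fun h => h.1)
  have hdw : (pvActive m v k).dropWhile (fun p => decide (p.1 < (k : Int) - m))
      = (pvSM m v k).filter (fun p => decide ((k : Int) - m ≤ p.1)) := by
    rw [pvDropWhile_sorted _ _ hApw,
      show pvActive m v k = (pvSM m v k).filter
        (fun p => decide ((k : Int) - 1 - m ≤ p.1 ∨ p.1 = (k : Int) - 1)) from rfl,
      List.filter_filter]
    apply List.filter_congr
    intro p hp
    rw [Bool.eq_iff_iff]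
    simp only [Bool.and_eq_true, decide_eq_true_eq]
    constructor
    · rintro ⟨h1, _⟩
      exact h1
    · intro h
      exact ⟨h, Or.inl (by omega)⟩
  have hdwpw : ((pvActive m v k).dropWhile (fun p => decide (p.1 < (k : Int) - m))).Pairwise (fun p q => q.2 < p.2) := by
    rw [hdw]
    exact (List.Pairwise.filter _ (pvSM_pairwise m v k)).imp (fun h => h.2)
  have hsplit : dead ++ pvActive m v k
      = (dead ++ (pvActive m v k).takeWhile (fun p => decide (p.1 < (k : Int) - m))) ++ (pvActive m v k).dropWhile (fun p => decide (p.1 < (k : Int) - m)) := by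
    rw [List.append_assoc, List.takeWhile_append_dropWhile]
  have hev : pvEvict (dead ++ pvActive m v k) ((k : Int) - m) dead.length
      = (dead ++ (pvActive m v k).takeWhile (fun p => decide (p.1 < (k : Int) - m))).length := by
    rw [pvEvict_spec]
    simp
  simp only [pvBStep]
  rw [hev]
  have hdp : (if (dead ++ (pvActive m v k).takeWhile (fun p => decide (p.1 < (k : Int) - m))).length < (dead ++ pvActive m v k).length then
        v.getD k 0 + ((dead ++ pvActive m v k).getD (dead ++ (pvActive m v k).takeWhile (fun p => decide (p.1 < (k : Int) - m))).length (0, 0)).2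
      else v.getD k 0) = pvDpf m v k := by
    rcases hdwc : (pvActive m v k).dropWhile (fun p => decide (p.1 < (k : Int) - m)) with _ | ⟨q, rest⟩
    · have hlen : (dead ++ pvActive m v k).length = (dead ++ (pvActive m v k).takeWhile (fun p => decide (p.1 < (k : Int) - m))).length := by
        rw [hsplit, hdwc]
        simp
      rw [if_neg (by omega)]
      have hwin : pvWin m v k = [] := (pvFront_empty_iff m v k).mp (by rw [← hdw, hdwc])
      rw [pvDpf_def, hwin]
      simp
    · rw [if_pos (by rw [hsplit, hdwc]; simp)]
      have hget : (dead ++ pvActive m v k).getD (dead ++ (pvActive m v k).takeWhile (fun p => decide (p.1 < (k : Int) - m))).length (0, 0) = q := by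
        rw [hsplit, hdwc]
        simp [List.getD_eq_getElem?_getD, List.getElem?_append_right (le_refl _)]
      rw [hget, pvDpf_def,
        pvFront_head m v k q rest (by rw [← hdw, hdwc])]
  rw [hdp]
  have hpop : pvPop (dead ++ pvActive m v k) (dead ++ (pvActive m v k).takeWhile (fun p => decide (p.1 < (k : Int) - m))).length (pvDpf m v k)
      = (dead ++ (pvActive m v k).takeWhile (fun p => decide (p.1 < (k : Int) - m))) ++ ((pvActive m v k).dropWhile (fun p => decide (p.1 < (k : Int) - m))).takeWhile (fun p => decide (pvDpf m v k < p.2)) := by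
    rw [hsplit]
    exact pvPop_spec _ _ hdwpw _
  rw [hpop]
  have hact : ((pvActive m v k).dropWhile (fun p => decide (p.1 < (k : Int) - m))).takeWhile (fun p => decide (pvDpf m v k < p.2)) ++ [((k : Int), pvDpf m v k)]
      = pvActive m v (k + 1) := by
    rw [pvTakeWhile_sorted _ _ hdwpw, hdw, List.filter_filter]
    rw [show pvActive m v (k + 1) = (pvSM m v (k + 1)).filter
        (fun p => decide (((k : Nat) + 1 : Int) - 1 - m ≤ p.1 ∨ p.1 = ((k : Nat) + 1 : Int) - 1)) from by
      rw [pvActive]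
      push_cast
      rfl]
    rw [pvSM_succ, List.filter_append, List.filter_filter]
    congr 1
    · apply List.filter_congr
      intro p hp
      obtain ⟨j, hj, rfl, _⟩ := (pvSM_mem m v k p).mp hp
      rw [Bool.eq_iff_iff]
      simp only [Bool.and_eq_true, decide_eq_true_eq]
      constructor
      · rintro ⟨h1, h2⟩
        refine ⟨Or.inl (by push_cast; push_cast at h2; omega), h1⟩
      · rintro ⟨h1 | h1, h2⟩
        · exact ⟨h2, by push_cast; push_cast at h1; omega⟩
        · exfalso
          push_cast at h1
          omega
    · simp only [List.filter_cons, List.filter_nil]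
      split_ifs with hcond
      · rfl
      · exfalso
        simp only [decide_eq_true_eq, not_or] at hcond
        push_cast at hcond
        omega
  simp only [List.append_assoc]
  rw [hact, show pvD m v (k + 1) = pvDpf m v k from by rw [pvD]; simp]

lemma pvBLoop (m : Int) (v : List Int) (n : Nat) :
    ∃ dead : List (Int × Int),
      (List.range n).foldl (fun st (k : Nat) => pvBStep m st ((k : Int), v.getD k 0)) ([], 0, 0)
        = (dead ++ pvActive m v n, dead.length, pvD m v n) := by
  induction n with
  | zero => exact ⟨[], by simp [pvActive, pvSM, pvD]⟩
  | succ n ih =>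
    obtain ⟨dead, hdead⟩ := ih
    obtain ⟨dead', hstep⟩ := pvBStep_eq m v n dead
    refine ⟨dead', ?_⟩
    rw [List.range_succ, List.foldl_append, hdead, List.foldl_cons, List.foldl_nil, hstep]

lemma Dynamic_Adventure_alt_eq_dpf (arr : List Int) (h : 2 ≤ arr.length) :
    Dynamic_Adventure_alt arr =
      pvDpf ((PySem.List.pyGet? arr 0).getD 0) arr.tail (arr.tail.length - 1) := by
  unfold Dynamic_Adventure_alt
  change ((PySem.List.enumerate (PySem.List.slice arr (some 1) none) 0).foldl
      (pvBStep ((PySem.List.pyGet? arr 0).getD 0)) ([], 0, 0)).2.2 = _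
  rw [PySem.List.slice_from_one]
  set m' := (PySem.List.pyGet? arr 0).getD 0
  have henum : PySem.List.enumerate arr.tail 0
      = (List.range arr.tail.length).map (fun (kk : Nat) => ((kk : Int), arr.tail.getD kk 0)) := by
    rw [PySem.List.enumerate_eq_map_pyRange (d := 0), PySem.List.pyRange_one, List.map_map]
    apply List.map_congr_left
    intro kk hk
    simp
  rw [henum, List.foldl_map]
  obtain ⟨dead, hd⟩ := pvBLoop m' arr.tail arr.tail.length
  rw [hd, pvD, if_neg (by rw [List.length_tail]; omega)]

-- ===== VERDICT (by name: the statement is the Claim_ definition above) =====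
theorem Dynamic_Adventure_spec : Claim_equal_Dynamic_Adventure := by
  intro arr _ hpre
  unfold Spec_Dynamic_Adventure
  rw [Dynamic_Adventure_eq_dpf arr hpre, Dynamic_Adventure_alt_eq_dpf arr hpre]
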